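-- pv_equiv track=rewrite | github.com/fire/bmesh-encoding | decoding.py | decode_implicit_triangle_fan
-- ===== SOURCE A (Python) =====
-- from typing import Any, Dict, List, Optional, Tuple
--
-- def decode_implicit_triangle_fan(triangles: List[Tuple]) -> List[List[int]]:
--     """
--     Decode triangle fan back to polygon faces.
--
--     This provides graceful fallback when EXT_bmesh_encoding is not fully supported.
--     """
--     if not triangles:
--         return []
--
--     faces = []
--     current_face_vertices = []
--     prev_anchor = None
--
--     for triangle in triangles:
--         if len(triangle) < 3:
--             continue
--
--         anchor = triangle[0]
--
--         if anchor != prev_anchor: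
--             # New face starts
--             if current_face_vertices:
--                 faces.append(current_face_vertices)
--             current_face_vertices = list(triangle)
--             prev_anchor = anchor
--         else:
--             # Continue triangle fan for same face
--             # Add the new vertex from this triangle
--             new_vertex = triangle[2]  # Third vertex of triangle
--             if new_vertex not in current_face_vertices:
--                 current_face_vertices.append(new_vertex)
--
--     # Handle last face
--     if current_face_vertices:
--         faces.append(current_face_vertices)
--
--     return faces
-- ===== SOURCE B (Python) =====
-- def decode_implicit_triangle_fan(triangles):
--     # Staged decomposition: filter out degenerate (<3) triangles, carve the list
--     # into maximal consecutive runs sharing triangle[0], and build each face in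
--     # one shot: the first triangle copied whole, plus the run's third vertices
--     # deduplicated up front (dict.fromkeys) and filtered against the first triangle.
--     valid = [t for t in triangles if len(t) >= 3]
--     faces = []
--     rest = valid
--     while rest:
--         first = rest[0]
--         run = 1
--         while run < len(rest) and rest[run][0] == first[0]:
--             run += 1
--         thirds = list(dict.fromkeys(t[2] for t in rest[1:run]))
--         faces.append(list(first) + [v for v in thirds if v not in first])
--         rest = rest[run:]
--     return faces
-- ===== Notes on version B (the rewrite author's own statement) =====
-- stated objective: alternative
-- what changed: B replaces A's single-pass prev_anchor state machine (which grows the current face by membership-checked appends) with staged passes: filter degenerate triangles, carve the list into maximal anchor-runs, and build each face in one shot as first-triangle + dict.fromkeys-deduplicated third vertices filtered against the first triangle.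
import Mathlib
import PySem

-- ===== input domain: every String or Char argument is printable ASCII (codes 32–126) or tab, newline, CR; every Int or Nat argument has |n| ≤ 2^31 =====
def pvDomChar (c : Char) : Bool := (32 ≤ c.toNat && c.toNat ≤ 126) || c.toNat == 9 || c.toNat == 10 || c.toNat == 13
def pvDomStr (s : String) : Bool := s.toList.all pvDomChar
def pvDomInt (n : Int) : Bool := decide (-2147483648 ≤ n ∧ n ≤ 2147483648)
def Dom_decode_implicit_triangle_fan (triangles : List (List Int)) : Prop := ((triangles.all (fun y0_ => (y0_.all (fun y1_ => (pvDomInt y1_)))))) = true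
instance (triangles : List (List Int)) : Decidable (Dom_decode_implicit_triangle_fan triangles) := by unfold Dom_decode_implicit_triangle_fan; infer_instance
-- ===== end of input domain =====

-- B replaces A's flat prev_anchor state machine by staged passes (filter, anchor-run
-- splitting, per-run face = first triangle ++ deduped-then-filtered third vertices);
-- objective: alternative decomposition, same cost; return values proved equal on Dom.

-- ===== PORT A =====
-- one loop step of A: state = (faces, current_face_vertices, prev_anchor).
-- triangle[0] / triangle[2] are ported as getD with an unreachable default, guarded
-- (as in A) by the `len(triangle) < 3: continue` test.
def pvBodyA (st : List (List Int) × List Int × Option Int) (t : List Int) :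
    List (List Int) × List Int × Option Int :=
  if t.length < 3 then st
  else if some (t.getD 0 0) ≠ st.2.2 then
    ((if st.2.1 = [] then st.1 else st.1 ++ [st.2.1]), t, some (t.getD 0 0))
  else
    (st.1, (if t.getD 2 0 ∈ st.2.1 then st.2.1 else st.2.1 ++ [t.getD 2 0]), st.2.2)

def decode_implicit_triangle_fan (triangles : List (List Int)) : List (List Int) :=
  if triangles = [] then []
  else
    let st := triangles.foldl pvBodyA ([], [], none)
    if st.2.1 = [] then st.1 else st.1 ++ [st.2.1]

-- ===== PORT B =====
-- B's outer while loop: peel off the maximal run of triangles sharing the first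
-- anchor (the inner counting scan + slices rest[1:run]/rest[k:] = takeWhile/dropWhile),
-- build the run's face in one shot (first triangle ++ dict.fromkeys-deduplicated
-- third vertices not already in the first triangle), recurse on the rest.
def pvChunkB : List (List Int) → List (List Int)
  | [] => []
  | t :: ts =>
    (t ++ (PySem.List.dedup ((ts.takeWhile (fun u => u.getD 0 0 == t.getD 0 0)).map
            (fun u => u.getD 2 0))).filter (fun v => !(t.contains v))) ::
      pvChunkB (ts.dropWhile (fun u => u.getD 0 0 == t.getD 0 0))
termination_by l => l.length
decreasing_by
  exact Nat.lt_succ_of_le (List.length_dropWhile_le _ _)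

def decode_implicit_triangle_fan_alt (triangles : List (List Int)) : List (List Int) :=
  pvChunkB (triangles.filter (fun t => 3 ≤ t.length))

-- ===== PRECONDITION & SPEC =====
def Spec_decode_implicit_triangle_fan (triangles : List (List Int)) (out : List (List Int)) : Prop := out = decode_implicit_triangle_fan_alt triangles
instance (triangles : List (List Int)) (out : List (List Int)) : Decidable (Spec_decode_implicit_triangle_fan triangles out) := by unfold Spec_decode_implicit_triangle_fan; infer_instance

-- ===== CLAIM (what is proved, stated in full; the proofs are below) =====
def Claim_equal_decode_implicit_triangle_fan : Prop := ∀ (triangles : List (List Int)), Dom_decode_implicit_triangle_fan triangles → Spec_decode_implicit_triangle_fan triangles (decode_implicit_triangle_fan triangles)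

-- ===== LEMMAS AND PROOFS =====

-- closing step of A: append the pending face if nonempty
def pvFinish (st : List (List Int) × List Int × Option Int) : List (List Int) :=
  if st.2.1 = [] then st.1 else st.1 ++ [st.2.1]

theorem pvChunkB_nil : pvChunkB [] = [] := by rw [pvChunkB]

theorem pvChunkB_cons (t : List Int) (ts : List (List Int)) :
    pvChunkB (t :: ts) =
      (t ++ (PySem.List.dedup ((ts.takeWhile (fun u => u.getD 0 0 == t.getD 0 0)).map
            (fun u => u.getD 2 0))).filter (fun v => !(t.contains v))) ::
        pvChunkB (ts.dropWhile (fun u => u.getD 0 0 == t.getD 0 0)) := by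
  rw [pvChunkB]

theorem pvBodyA_short {t : List Int} (h : t.length < 3) (st) : pvBodyA st t = st := by
  simp [pvBodyA, h]

-- A's loop ignores triangles shorter than 3: fold over the filtered list is the same
theorem pvFoldA_filter (ts : List (List Int)) :
    ∀ st, ts.foldl pvBodyA st = (ts.filter (fun t => 3 ≤ t.length)).foldl pvBodyA st := by
  induction ts with
  | nil => intro st; rfl
  | cons t ts ih =>
    intro st
    by_cases h : 3 ≤ t.length
    · simp [h, ih]
    · have h' : t.length < 3 := by omega
      simp [h, pvBodyA_short h', ih]

-- A's "continue the fan" update of the current face IS PySem.Set.add on triangle[2]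
theorem pvExtB_eq_add (f : List Int) (v : Int) :
    (if v ∈ f then f else f ++ [v]) = PySem.Set.add f v := by
  simp [PySem.Set.add, PySem.Set.contains]

-- running A's loop through a run of triangles whose anchor equals prev_anchor:
-- only the "continue" branch fires; the face is updated exactly by Set.add on thirds
theorem pvFoldA_run (run : List (List Int)) (a : Int) :
    ∀ faces cur, (∀ u ∈ run, 3 ≤ u.length ∧ u.getD 0 0 = a) →
      run.foldl pvBodyA (faces, cur, some a) =
        (faces, (run.map (fun u => u.getD 2 0)).foldl PySem.Set.add cur, some a) := by
  induction run with
  | nil => intro faces cur _; rfl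
  | cons u run ih =>
    intro faces cur h
    have hu := h u (by simp)
    have hlen : ¬ u.length < 3 := by omega
    have hrest : ∀ v ∈ run, 3 ≤ v.length ∧ v.getD 0 0 = a := fun v hv => h v (by simp [hv])
    have hb : pvBodyA (faces, cur, some a) u = (faces, PySem.Set.add cur (u.getD 2 0), some a) := by
      have h2 : u.getD 0 0 = a := hu.2
      rw [← pvExtB_eq_add]
      simp only [pvBodyA, if_neg hlen, h2, ne_eq, not_true_eq_false, if_false]
    rw [List.foldl_cons, hb, ih _ _ hrest, List.map_cons, List.foldl_cons]

-- the per-run face A computes equals the face B builds in one shot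
theorem pvRunFace (t : List Int) (run : List (List Int)) :
    (run.map (fun u => u.getD 2 0)).foldl PySem.Set.add t =
      t ++ (PySem.List.dedup (run.map (fun u => u.getD 2 0))).filter
        (fun v => !(t.contains v)) := by
  have h1 : (run.map (fun u => u.getD 2 0)).foldl PySem.Set.add t =
      PySem.Set.update t (run.map (fun u => u.getD 2 0)) := rfl
  rw [h1, PySem.Set.update_eq_append_filter]
  simp [PySem.List.dedup_eq_ofList, PySem.Set.contains]

theorem pvHead?_dropWhile_not {α : Type} (p : α → Bool) :
    ∀ (l : List α) (u : α), (l.dropWhile p).head? = some u → p u = false := by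
  intro l
  induction l with
  | nil => intro u h; simp at h
  | cons x xs ih =>
    intro u h
    by_cases hx : p x = true
    · rw [List.dropWhile_cons_of_pos hx] at h; exact ih u h
    · rw [List.dropWhile_cons_of_neg hx] at h
      simp only [List.head?_cons, Option.some.injEq] at h
      subst h
      simpa using hx

-- main invariant: from a state whose prev_anchor mismatches the next anchor,
-- A's loop plus closing equals the already-emitted faces, the pending face, and B's chunks
theorem pvMain : ∀ n (fs : List (List Int)), fs.length ≤ n →
    (∀ t ∈ fs, 3 ≤ t.length) →
    ∀ (faces : List (List Int)) (cur : List Int) (prev : Option Int),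
      (∀ t, fs.head? = some t → prev ≠ some (t.getD 0 0)) →
      pvFinish (fs.foldl pvBodyA (faces, cur, prev)) =
        (faces ++ (if cur = [] then [] else [cur])) ++ pvChunkB fs := by
  intro n
  induction n with
  | zero =>
    intro fs hlen _ faces cur prev _
    have : fs = [] := List.eq_nil_of_length_eq_zero (Nat.le_zero.mp hlen)
    subst this
    rw [pvChunkB_nil]
    simp only [List.foldl_nil, pvFinish, List.append_nil]
    split <;> simp
  | succ n ih =>
    intro fs hlen h3 faces cur prev hmis
    cases fs with
    | nil =>
      rw [pvChunkB_nil]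
      simp only [List.foldl_nil, pvFinish, List.append_nil]
      split <;> simp
    | cons t ts =>
      have ht := h3 t (by simp)
      have hlent : ¬ t.length < 3 := by omega
      have hne : some (t.getD 0 0) ≠ prev := fun e => hmis t rfl e.symm
      have hsplit : ts = ts.takeWhile (fun u => u.getD 0 0 == t.getD 0 0) ++
          ts.dropWhile (fun u => u.getD 0 0 == t.getD 0 0) :=
        (List.takeWhile_append_dropWhile).symm
      have hb : pvBodyA (faces, cur, prev) t =
          ((if cur = [] then faces else faces ++ [cur]), t, some (t.getD 0 0)) := by
        simp only [pvBodyA, if_neg hlent, if_pos hne]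
      have hrunprop : ∀ u ∈ ts.takeWhile (fun u => u.getD 0 0 == t.getD 0 0),
          3 ≤ u.length ∧ u.getD 0 0 = t.getD 0 0 := by
        intro u hu
        have hp : (fun u => u.getD 0 0 == t.getD 0 0) u = true := List.mem_takeWhile_imp (l := ts) (p := fun u => u.getD 0 0 == t.getD 0 0) hu
        have hmem : u ∈ ts := (List.takeWhile_sublist _).subset hu
        exact ⟨h3 u (by simp [hmem]), by simpa using hp⟩
      have hrestprop : ∀ u ∈ ts.dropWhile (fun u => u.getD 0 0 == t.getD 0 0),
          3 ≤ u.length := by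
        intro u hu
        have : u ∈ ts := (List.dropWhile_sublist _).subset hu
        exact h3 u (by simp [this])
      have hrestlen : (ts.dropWhile (fun u => u.getD 0 0 == t.getD 0 0)).length ≤ n := by
        have h1 := List.length_dropWhile_le (fun u => u.getD 0 0 == t.getD 0 0) ts
        have h2 : ts.length + 1 ≤ n + 1 := by simpa using hlen
        omega
      have hresthead : ∀ u,
          (ts.dropWhile (fun u => u.getD 0 0 == t.getD 0 0)).head? = some u →
          (some (t.getD 0 0) : Option Int) ≠ some (u.getD 0 0) := by
        intro u hu
        have hp := pvHead?_dropWhile_not _ ts u hu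
        intro e
        injection e with e'
        exact absurd e'.symm (by simpa using hp)
      have htne : t ≠ [] := by intro e; rw [e] at ht; simp at ht
      have hcur1 : t ++ (PySem.List.dedup
            ((ts.takeWhile (fun u => u.getD 0 0 == t.getD 0 0)).map
              (fun u => u.getD 2 0))).filter (fun v => !(t.contains v)) ≠ [] := by
        simp [htne]
      calc pvFinish ((t :: ts).foldl pvBodyA (faces, cur, prev))
          = pvFinish ((ts.dropWhile (fun u => u.getD 0 0 == t.getD 0 0)).foldl pvBodyA
              ((if cur = [] then faces else faces ++ [cur]),
                t ++ (PySem.List.dedup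
                  ((ts.takeWhile (fun u => u.getD 0 0 == t.getD 0 0)).map
                    (fun u => u.getD 2 0))).filter (fun v => !(t.contains v)),
                some (t.getD 0 0))) := by
            conv_lhs => rw [List.foldl_cons, hb, hsplit]
            rw [List.foldl_append, pvFoldA_run _ _ _ t hrunprop, pvRunFace]
        _ = (((if cur = [] then faces else faces ++ [cur]) ++
              [t ++ (PySem.List.dedup
                ((ts.takeWhile (fun u => u.getD 0 0 == t.getD 0 0)).map
                  (fun u => u.getD 2 0))).filter (fun v => !(t.contains v))])
              ++ pvChunkB (ts.dropWhile (fun u => u.getD 0 0 == t.getD 0 0))) := by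
            rw [ih _ hrestlen hrestprop _ _ _ hresthead, if_neg hcur1]
        _ = (faces ++ (if cur = [] then [] else [cur])) ++ pvChunkB (t :: ts) := by
            rw [pvChunkB_cons]
            split <;> simp

-- ===== VERDICT (by name: the statement is the Claim_ definition above) =====
theorem decode_implicit_triangle_fan_spec : Claim_equal_decode_implicit_triangle_fan := by
  intro triangles _
  unfold Spec_decode_implicit_triangle_fan decode_implicit_triangle_fan decode_implicit_triangle_fan_alt
  by_cases hnil : triangles = []
  · subst hnil; simp [pvChunkB_nil]
  · simp only [hnil, if_false]
    have := pvMain (triangles.filter (fun t => 3 ≤ t.length)).length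
      (triangles.filter (fun t => 3 ≤ t.length)) le_rfl
      (by intro t ht; have := List.of_mem_filter ht; simpa using this)
      [] [] none (by intro t _ e; simp at e)
    rw [pvFoldA_filter]
    simpa [pvFinish] using this
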